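-- pv_equiv track=rewrite | github.com/naifalshaye/chatcmd | chatcmd/lookup/enhanced_lookup.py | _is_invalid_response
-- ===== SOURCE A (Python) =====
-- def _is_invalid_response(command: str) -> bool:
--     """Check if the response indicates no command was found"""
--     if not command:
--         return True
--
--     command_lower = command.lower()
--     invalid_phrases = [
--         'there is no command',
--         'no specific command',
--         'not a command',
--         'cannot find',
--         'unable to',
--         'sorry,',
--         'i cannot',
--         'i don\'t know',
--         'no command exists',
--         'command not found'
--     ]
--
--     for phrase in invalid_phrases:
--         if phrase in command_lower:
--             return True
--
--     return False
-- ===== SOURCE B (Python) =====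
-- def _is_invalid_response(command: str) -> bool:
--     """Check if the response indicates no command was found"""
--     if not command:
--         return True
--
--     invalid_phrases = (
--         'there is no command',
--         'no specific command',
--         'not a command',
--         'cannot find',
--         'unable to',
--         'sorry,',
--         'i cannot',
--         'i don\'t know',
--         'no command exists',
--         'command not found',
--     )
--
--     command_lower = command.lower()
--     # single left-to-right pass: at each offset, does some phrase start here?
--     return any(command_lower.startswith(p, i)
--                for i in range(len(command_lower))
--                for p in invalid_phrases)
-- ===== Notes on version B (the rewrite author's own statement) =====
-- stated objective: alternative
-- what changed: Replaces ten separate substring scans (phrase-major, one 'in' search per phrase) with a single position-major pass over the lowered string that tests at each offset whether any phrase starts there via startswith(p, i).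
import Mathlib
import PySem

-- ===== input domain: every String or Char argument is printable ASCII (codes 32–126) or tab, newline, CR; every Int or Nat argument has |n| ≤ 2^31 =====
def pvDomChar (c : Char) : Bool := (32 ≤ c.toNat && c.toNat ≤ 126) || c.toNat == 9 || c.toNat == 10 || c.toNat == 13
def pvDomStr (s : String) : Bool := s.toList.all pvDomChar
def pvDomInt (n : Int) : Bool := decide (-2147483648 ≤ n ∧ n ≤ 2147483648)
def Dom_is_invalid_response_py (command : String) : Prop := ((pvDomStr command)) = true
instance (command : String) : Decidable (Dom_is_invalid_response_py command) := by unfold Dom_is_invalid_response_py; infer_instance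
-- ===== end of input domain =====

-- B replaces A's ten separate substring scans by one position-major pass that
-- tests at each offset whether any phrase starts there (alternative, same cost).

-- the shared constant list of phrases (data, identical in A and B)
def pvPhrases : List String :=
  ["there is no command", "no specific command", "not a command", "cannot find",
   "unable to", "sorry,", "i cannot", "i don't know", "no command exists",
   "command not found"]

-- ===== PORT A =====
-- A's for-loop with early return: recursion over the phrase list
def pvLoopA : List String → List Char → Bool
  | [], _ => false
  | p :: rest, cl => if PySem.Chars.isIn p.toList cl then true else pvLoopA rest cl

def is_invalid_response_py (command : String) : Bool :=
  if command.toList = [] then true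
  else pvLoopA pvPhrases (PySem.Chars.lower command.toList)

-- ===== PORT B =====
-- Source B: any over range(len(cl)) of any phrase-startswith at that offset
def is_invalid_response_py_alt (command : String) : Bool :=
  if command.toList = [] then true
  else
    let cl := PySem.Chars.lower command.toList
    (PySem.List.pyRange 0 cl.length 1).any (fun i =>
      pvPhrases.any (fun p => PySem.Chars.startswith (cl.drop i.toNat) p.toList))

-- ===== PRECONDITION & SPEC =====
def Spec_is_invalid_response_py (command : String) (out : Bool) : Prop := out = is_invalid_response_py_alt command
instance (command : String) (out : Bool) : Decidable (Spec_is_invalid_response_py command out) := by unfold Spec_is_invalid_response_py; infer_instance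

-- ===== CLAIM (what is proved, stated in full; the proofs are below) =====
def Claim_equal_is_invalid_response_py : Prop := ∀ (command : String), Dom_is_invalid_response_py command → Spec_is_invalid_response_py command (is_invalid_response_py command)

-- ===== LEMMAS AND PROOFS =====

lemma pvLoopA_eq_any (ps : List String) (cl : List Char) :
    pvLoopA ps cl = ps.any (fun p => PySem.Chars.isIn p.toList cl) := by
  induction ps with
  | nil => rfl
  | cons p rest ih =>
      simp only [pvLoopA, List.any_cons, ← ih]
      by_cases h : PySem.Chars.isIn p.toList cl = true <;> simp [h]

lemma pvPhrases_ne_nil : ∀ p ∈ pvPhrases, p.toList ≠ [] := by decide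

-- quantifier swap + isIn ↔ some offset has the phrase as prefix
lemma pv_main (cl : List Char) :
    pvLoopA pvPhrases cl =
      (PySem.List.pyRange 0 cl.length 1).any (fun i =>
        pvPhrases.any (fun p => PySem.Chars.startswith (cl.drop i.toNat) p.toList)) := by
  rw [pvLoopA_eq_any]
  rw [Bool.eq_iff_iff]
  simp only [List.any_eq_true, PySem.List.mem_pyRange_one,
    PySem.Chars.startswith_iff]
  constructor
  · rintro ⟨p, hp, hin⟩
    obtain ⟨j, hpre⟩ := (PySem.Chars.exists_prefix_drop_iff_isIn p.toList cl).mpr hin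
    have hj : j < cl.length := by
      by_contra h
      rw [List.drop_eq_nil_of_le (by omega)] at hpre
      exact pvPhrases_ne_nil p hp (List.prefix_nil.mp hpre)
    exact ⟨(j : Int), ⟨by omega, by exact_mod_cast hj⟩, p, hp, by
      simpa using hpre⟩
  · rintro ⟨i, ⟨hi0, _⟩, p, hp, hpre⟩
    refine ⟨p, hp, (PySem.Chars.exists_prefix_drop_iff_isIn p.toList cl).mp ⟨i.toNat, hpre⟩⟩

-- ===== VERDICT (by name: the statement is the Claim_ definition above) =====
theorem is_invalid_response_py_spec : Claim_equal_is_invalid_response_py := by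
  intro command _
  unfold Spec_is_invalid_response_py is_invalid_response_py is_invalid_response_py_alt
  by_cases h : command.toList = []
  · simp [h]
  · simp only [h]
    exact pv_main _
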